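-- pv_equiv track=rewrite | github.com/nirkoren1/Chord_Transformer | data_clean/create_data.py | valid_chord
-- ===== SOURCE A (Python) =====
-- def valid_chord(chord):
--     good_letters = ["A", "B", "C", "D", "E", "F", "G"]
--     bad_letters = ["(", ")", "-", "'", '"']
--     i = 0
--     for letter in good_letters:
--         if letter in chord:
--             i += 1
--     if i == 0:
--         return False
--     for letter in bad_letters:
--         if letter in chord:
--             return False
--     return True
-- ===== SOURCE B (Python) =====
-- def valid_chord(chord):
--     good = {"A", "B", "C", "D", "E", "F", "G"}
--     bad = {"(", ")", "-", "'", '"'}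
--     found = False
--     for ch in chord:
--         if ch in bad:
--             return False
--         if ch in good:
--             found = True
--     return found
-- ===== Notes on version B (the rewrite author's own statement) =====
-- stated objective: simpler
-- what changed: B makes a single pass over the characters of chord, failing immediately on a forbidden character and flagging a good letter, instead of A's twelve separate substring scans (seven counting 'in' tests plus up to five more).
import Mathlib
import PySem

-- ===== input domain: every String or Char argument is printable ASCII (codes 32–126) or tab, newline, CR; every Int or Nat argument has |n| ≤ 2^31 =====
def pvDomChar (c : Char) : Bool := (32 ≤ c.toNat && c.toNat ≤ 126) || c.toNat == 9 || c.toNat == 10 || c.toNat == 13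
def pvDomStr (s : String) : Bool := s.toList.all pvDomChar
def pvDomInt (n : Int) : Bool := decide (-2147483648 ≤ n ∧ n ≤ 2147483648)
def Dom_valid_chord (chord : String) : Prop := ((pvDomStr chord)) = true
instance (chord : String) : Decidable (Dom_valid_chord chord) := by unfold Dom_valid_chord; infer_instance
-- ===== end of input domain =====

-- B replaces A's twelve separate substring scans by one pass over the characters; objective: simpler.

-- ===== PORT A =====
def good_letters : List String := ["A", "B", "C", "D", "E", "F", "G"]
def bad_letters : List String := ["(", ")", "-", "'", "\""]

def valid_chord (chord : String) : Bool :=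
  let i : Int := good_letters.foldl (fun i letter => if PySem.Str.isIn letter chord then i + 1 else i) 0
  if i = 0 then false
  else if bad_letters.any (fun letter => PySem.Str.isIn letter chord) then false
  else true

-- ===== PORT B =====
def validChordAltGo : List Char → Bool → Bool
  | [], found => found
  | c :: cs, found =>
    if c ∈ ['(', ')', '-', '\'', '"'] then false
    else validChordAltGo cs (found || c ∈ ['A', 'B', 'C', 'D', 'E', 'F', 'G'])

def valid_chord_alt (chord : String) : Bool :=
  validChordAltGo chord.toList false

-- ===== PRECONDITION & SPEC =====
def Spec_valid_chord (chord : String) (out : Bool) : Prop := out = valid_chord_alt chord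
instance (chord : String) (out : Bool) : Decidable (Spec_valid_chord chord out) := by unfold Spec_valid_chord; infer_instance

-- ===== CLAIM (what is proved, stated in full; the proofs are below) =====
def Claim_equal_valid_chord : Prop := ∀ (chord : String), Dom_valid_chord chord → Spec_valid_chord chord (valid_chord chord)

-- ===== LEMMAS AND PROOFS =====

-- a single-character substring test is character membership
theorem isIn_singleton (c : Char) (l : List Char) :
    PySem.Chars.isIn [c] l = decide (c ∈ l) := by
  rcases h : decide (c ∈ l) with hf | ht
  · rw [PySem.Chars.isIn_eq_false_iff]
    intro hinf
    have hm : c ∈ l := (List.singleton_sublist).1 hinf.sublist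
    simp [hm] at h
  · rcases List.append_of_mem (by simpa using h) with ⟨s, t, rfl⟩
    rw [PySem.Chars.isIn_iff_infix]
    exact ⟨s, t, by simp⟩

-- B's loop computes: no bad char anywhere, and (found or some good char)
theorem validChordAltGo_spec (cs : List Char) (found : Bool) :
    validChordAltGo cs found =
      (!(cs.any (fun c => c ∈ ['(', ')', '-', '\'', '"'])) &&
        (found || cs.any (fun c => c ∈ ['A', 'B', 'C', 'D', 'E', 'F', 'G']))) := by
  induction cs generalizing found with
  | nil => simp [validChordAltGo]
  | cons c cs ih =>
    by_cases hb : c ∈ ['(', ')', '-', '\'', '"']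
    · rcases (by simpa using hb : c = '(' ∨ c = ')' ∨ c = '-' ∨ c = '\'' ∨ c = '"') with
        rfl | rfl | rfl | rfl | rfl <;> simp [validChordAltGo]
    · obtain ⟨h1, h2, h3, h4, h5⟩ : ¬c = '(' ∧ ¬c = ')' ∧ ¬c = '-' ∧ ¬c = '\'' ∧ ¬c = '"' := by
        simpa using hb
      simp [validChordAltGo, h1, h2, h3, h4, h5, ih, Bool.or_assoc]

-- swap the quantification order between "some char of l is in the literal list" forms
theorem any_mem_comm (l g : List Char) :
    l.any (fun c => c ∈ g) = g.any (fun c => c ∈ l) := by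
  rw [Bool.eq_iff_iff]
  simp only [List.any_eq_true, decide_eq_true_eq]
  constructor
  · rintro ⟨c, hcl, hcg⟩; exact ⟨c, hcg, hcl⟩
  · rintro ⟨c, hcg, hcl⟩; exact ⟨c, hcl, hcg⟩

-- A's counting loop adds one per matching letter
theorem foldl_count (p : String → Bool) (xs : List String) (i : Int) :
    xs.foldl (fun i letter => if p letter then i + 1 else i) i = i + (xs.countP p : Int) := by
  induction xs generalizing i with
  | nil => simp
  | cons x xs ih =>
    by_cases hx : p x
    · simp only [List.foldl_cons, ih, List.countP_cons, hx]
      push_cast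
      ring
    · simp [hx, ih]

theorem valid_chord_spec : Claim_equal_valid_chord := by
  intro chord _
  unfold Spec_valid_chord valid_chord valid_chord_alt
  rw [validChordAltGo_spec]
  change (if (good_letters.foldl
        (fun i letter => if PySem.Str.isIn letter chord then i + 1 else i) (0 : Int)) = 0
      then false
      else if bad_letters.any (fun letter => PySem.Str.isIn letter chord) then false else true) = _
  unfold good_letters bad_letters
  have hG : (chord.toList.any (fun c => c ∈ ['A', 'B', 'C', 'D', 'E', 'F', 'G']))
      = (["A", "B", "C", "D", "E", "F", "G"] : List String).any
          (fun letter => PySem.Str.isIn letter chord) := by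
    rw [any_mem_comm]
    simp [isIn_singleton]
  have hB : (chord.toList.any (fun c => c ∈ ['(', ')', '-', '\'', '"']))
      = (["(", ")", "-", "'", "\""] : List String).any
          (fun letter => PySem.Str.isIn letter chord) := by
    rw [any_mem_comm]
    simp [isIn_singleton]
  rw [hB, hG, foldl_count]
  rcases hg : (["A", "B", "C", "D", "E", "F", "G"] : List String).any
      (fun letter => PySem.Str.isIn letter chord) with hf | ht
  · have hc0 : (["A", "B", "C", "D", "E", "F", "G"] : List String).countP
        (fun letter => PySem.Str.isIn letter chord) = 0 := by
      rw [List.countP_eq_zero]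
      intro a ha
      exact (List.any_eq_false.mp hg) a ha
    rw [hc0]
    simp
  · have hcpos : 0 < (["A", "B", "C", "D", "E", "F", "G"] : List String).countP
        (fun letter => PySem.Str.isIn letter chord) := by
      rw [List.countP_pos_iff]
      rcases List.any_eq_true.mp hg with ⟨a, ha, hpa⟩
      exact ⟨a, ha, hpa⟩
    have hne : (0 : Int) + ((["A", "B", "C", "D", "E", "F", "G"] : List String).countP
        (fun letter => PySem.Str.isIn letter chord) : Int) ≠ 0 := by
      omega
    rw [if_neg hne]
    rcases hbd : (["(", ")", "-", "'", "\""] : List String).any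
        (fun letter => PySem.Str.isIn letter chord) with hf | ht
    · simp
    · simp
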